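-- pv_equiv track=rewrite | github.com/alimoncul/whatsapp-message-calculator | whatsapp-message-calculator.py | messageCountPerPersonNoFlood
-- ===== SOURCE A (Python) =====
-- def messageCountPerPersonNoFlood(lines):
--     messageCounts = {}
--     lastPerson = ""
--     for i in lines:
--       if (i in messageCounts.keys()):
--         if(i==lastPerson):
--             continue;
--         else:
--             messageCounts[i]=messageCounts[i]+1
--             lastPerson = i
--       else:
--           messageCounts[i]=1
--           lastPerson = i
--     return messageCounts
-- ===== SOURCE B (Python) =====
-- from collections import Counter
--
-- def messageCountPerPersonNoFlood(lines):
--     # occurrences per line minus the number of adjacent duplicate pairs per line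
--     # (#runs of k == #occurrences of k - #positions where k is immediately repeated)
--     total = Counter(lines)
--     repeats = Counter(x for x, y in zip(lines, lines[1:]) if x == y)
--     return {k: total[k] - repeats[k] for k in total}
-- ===== Notes on version B (the rewrite author's own statement) =====
-- stated objective: alternative
-- what changed: Replaces A's single stateful pass (dict plus lastPerson skip logic) by an arithmetic identity computed from two Counters: occurrences per line minus the number of adjacent duplicate pairs per line (runs = occurrences - immediate repeats), combined in a dict comprehension.
import Mathlib
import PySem

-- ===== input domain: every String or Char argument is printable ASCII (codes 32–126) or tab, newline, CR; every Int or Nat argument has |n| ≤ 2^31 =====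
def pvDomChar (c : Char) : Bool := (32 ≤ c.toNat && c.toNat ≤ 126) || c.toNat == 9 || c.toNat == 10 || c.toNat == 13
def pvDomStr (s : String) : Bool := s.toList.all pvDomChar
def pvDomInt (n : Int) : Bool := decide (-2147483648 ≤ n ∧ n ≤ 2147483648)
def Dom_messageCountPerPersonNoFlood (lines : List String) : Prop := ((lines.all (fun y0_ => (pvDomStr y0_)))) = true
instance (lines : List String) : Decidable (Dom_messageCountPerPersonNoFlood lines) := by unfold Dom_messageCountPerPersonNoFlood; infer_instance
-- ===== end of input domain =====

-- B replaces A's single stateful pass (dict + lastPerson) by an arithmetic identity: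
-- Counter of all lines minus a Counter of adjacent duplicate pairs; alternative
-- decomposition, same O(n) cost.

-- ===== PORT A =====
-- A's loop state: (messageCounts, lastPerson); messageCounts[i] is read only under the
-- contains-guard, so getD is exact there.
def messageCountPerPersonNoFlood (lines : List String) : List (String × Int) :=
  (lines.foldl
    (fun (st : PySem.Dict String Int × String) i =>
      if st.1.contains i then
        if i == st.2 then st
        else (st.1.insert i (st.1.getD i 0 + 1), i)
      else (st.1.insert i 1, i))
    (PySem.Dict.empty, "")).1.items

-- ===== PORT B =====
-- total = Counter(lines); repeats = Counter(x for x, y in zip(lines, lines[1:]) if x == y);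
-- {k: total[k] - repeats[k] for k in total}.  lines[1:] is lines.drop 1 (in range);
-- the filtering generator expression is filterMap; Counter[k] on a present/absent key is getD k 0.
def messageCountPerPersonNoFlood_alt (lines : List String) : List (String × Int) :=
  let total := PySem.Dict.counter lines
  let repeats := PySem.Dict.counter
    ((lines.zip (lines.drop 1)).filterMap (fun p => if p.1 == p.2 then some p.1 else none))
  total.keys.map (fun k => (k, total.getD k 0 - repeats.getD k 0))

-- ===== PRECONDITION & SPEC =====
def Spec_messageCountPerPersonNoFlood (lines : List String) (out : List (String × Int)) : Prop := out = messageCountPerPersonNoFlood_alt lines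
instance (lines : List String) (out : List (String × Int)) : Decidable (Spec_messageCountPerPersonNoFlood lines out) := by unfold Spec_messageCountPerPersonNoFlood; infer_instance

-- ===== CLAIM (what is proved, stated in full; the proofs are below) =====
def Claim_equal_messageCountPerPersonNoFlood : Prop := ∀ (lines : List String), Dom_messageCountPerPersonNoFlood lines → Spec_messageCountPerPersonNoFlood lines (messageCountPerPersonNoFlood lines)

-- ===== LEMMAS AND PROOFS =====

-- A's loop step, named for the proofs
def pvStepA (st : PySem.Dict String Int × String) (i : String) : PySem.Dict String Int × String :=
  if st.1.contains i then
    if i == st.2 then st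
    else (st.1.insert i (st.1.getD i 0 + 1), i)
  else (st.1.insert i 1, i)

-- proof-only: the lines with consecutive duplicates removed, threaded by the previous line
def pvGroupKeys : Option String → List String → List String
  | _, [] => []
  | prev, x :: xs => if some x == prev then pvGroupKeys prev xs else x :: pvGroupKeys (some x) xs

-- invariant tying A's (dict, lastPerson) to the "previous element":
-- before any line is read prev = none, lastPerson = "" and "" is not yet a key;
-- afterwards prev = some lastPerson and lastPerson is a key.
def pvInv (prev : Option String) (d : PySem.Dict String Int) (lp : String) : Prop :=
  match prev with
  | none => lp = "" ∧ d.contains "" = false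
  | some p => p = lp ∧ d.contains lp = true

-- A's fold from (d, lp) produces the same dict as counting the collapsed remaining lines
theorem pvMain (lines : List String) : ∀ (d : PySem.Dict String Int) (lp : String)
    (prev : Option String), pvInv prev d lp →
    (lines.foldl pvStepA (d, lp)).1
      = (pvGroupKeys prev lines).foldl (fun d x => d.insert x (d.getD x 0 + 1)) d := by
  induction lines with
  | nil => intro d lp prev _; simp [pvGroupKeys]
  | cons i rest ih =>
    intro d lp prev hinv
    by_cases hc : d.contains i
    · by_cases hi : i = lp
      · -- repeated consecutive line: skipped on both sides
        subst hi
        have hprev : prev = some i := by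
          cases prev with
          | none =>
            exfalso
            obtain ⟨hlp, hne⟩ := hinv
            rw [hlp] at hc
            simp [hne] at hc
          | some p => simp [pvInv] at hinv; rw [hinv.1]
        have hdrop : (some i == prev) = true := by subst hprev; simp
        simp only [List.foldl_cons, pvStepA, hc, beq_self_eq_true, if_true,
          pvGroupKeys, hdrop]
        exact ih d i prev hinv
      · -- seen before, but not consecutive: counted on both sides
        have hkeep : (some i == prev) = false := by
          cases prev with
          | none => simp
          | some p =>
            simp [pvInv] at hinv
            simp [show i ≠ p from fun h => hi (h.trans hinv.1)]
        simp only [List.foldl_cons, pvStepA, hc, beq_iff_eq, if_neg hi,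
          pvGroupKeys, hkeep, Bool.false_eq_true, if_false]
        exact ih _ i (some i) ⟨rfl, PySem.Dict.contains_insert_self _ _ _⟩
    · -- first occurrence: counted on both sides (A writes 1, B writes getD+1 = 0+1)
      have hkeep : (some i == prev) = false := by
        cases prev with
        | none => simp
        | some p =>
          simp [pvInv] at hinv
          have : i ≠ p := fun h => by
            rw [h, hinv.1] at hc; exact absurd hinv.2 (by simp [hc])
          simp [this]
      have hz : d.getD i 0 = 0 := PySem.Dict.getD_of_not_contains d 0 (by simpa using hc)
      simp only [List.foldl_cons, pvStepA, hc, if_false, pvGroupKeys, hkeep,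
        Bool.false_eq_true, if_false, List.foldl_cons, hz, zero_add]
      exact ih _ i (some i) ⟨rfl, PySem.Dict.contains_insert_self _ _ _⟩

-- proof-only: the adjacent-duplicate pairs B subtracts
def pvReps (lines : List String) : List String :=
  (lines.zip (lines.drop 1)).filterMap (fun p => if p.1 == p.2 then some p.1 else none)

-- pending boundary pair: with a previous line p, the pair (p, first of l) also counts
def pvRepsFrom : Option String → List String → List String
  | none, l => pvReps l
  | some p, l => pvReps (p :: l)

theorem pvReps_cons (x : String) (xs : List String) :
    pvReps (x :: xs) = (match xs with
      | [] => []
      | y :: _ => if x == y then [x] else []) ++ pvReps xs := by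
  cases xs with
  | nil => simp [pvReps]
  | cons y t =>
    simp only [pvReps, List.drop_succ_cons, List.drop_zero, List.zip_cons_cons,
      List.filterMap_cons]
    split <;> simp_all

-- occurrences of k = runs of k + adjacent duplicates of k (threaded by the previous line)
theorem pvCountSplit (k : String) (lines : List String) : ∀ (prev : Option String),
    (pvGroupKeys prev lines).count k + (pvRepsFrom prev lines).count k
      = lines.count k := by
  induction lines with
  | nil => intro prev; cases prev <;> simp [pvGroupKeys, pvRepsFrom, pvReps]
  | cons x xs ih =>
    intro prev
    have hfrom : (pvRepsFrom prev (x :: xs)).count k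
        = (match prev with
            | none => 0
            | some p => if p == x then (if x = k then 1 else 0) else 0)
          + (pvRepsFrom (some x) xs).count k := by
      cases prev with
      | none => simp [pvRepsFrom]
      | some p =>
        simp only [pvRepsFrom, pvReps_cons, List.count_append]
        by_cases h : p = x <;> simp_all [List.count_cons]
    by_cases hp : (some x == prev)
    · have hpx : prev = some x := by simpa [eq_comm] using (beq_iff_eq.mp hp)
      subst hpx
      simp only [pvGroupKeys, hp, if_true, hfrom, beq_self_eq_true]
      have := ih (some x)
      by_cases hk : x = k <;> simp [hk] at * <;> omega
    · have hbd : (match prev with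
            | none => 0
            | some p => if p == x then (if x = k then 1 else 0) else 0) = 0 := by
        cases prev with
        | none => rfl
        | some p =>
          have : ¬ p = x := fun h => by simp [h] at hp
          simp [this]
      simp only [pvGroupKeys, hp, Bool.false_eq_true, if_false, hfrom, hbd,
        Nat.zero_add, List.count_cons]
      have := ih (some x)
      by_cases hk : x = k <;> simp [hk] at * <;> omega

-- dedup ignores the removal of consecutive duplicates
theorem pvDedupGroup (lines : List String) : ∀ (prev : Option String) (s : PySem.Set String),
    (∀ p, prev = some p → s.contains p = true) →
    (pvGroupKeys prev lines).foldl PySem.Set.add s = lines.foldl PySem.Set.add s := by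
  induction lines with
  | nil => intro prev s _; simp [pvGroupKeys]
  | cons x xs ih =>
    intro prev s hs
    by_cases hp : (some x == prev)
    · have hpx : prev = some x := by simpa [eq_comm] using (beq_iff_eq.mp hp)
      have hmem : x ∈ s := by simpa [PySem.Set.contains] using hs x hpx
      have hadd : PySem.Set.add s x = s := by simp [PySem.Set.add, hmem]
      simp only [pvGroupKeys, hp, if_true, List.foldl_cons, hadd]
      exact ih prev s hs
    · simp only [pvGroupKeys, hp, Bool.false_eq_true, if_false, List.foldl_cons]
      exact ih (some x) (PySem.Set.add s x)
        (fun p hp => by cases hp; simp [PySem.Set.add]; split <;> simp_all [PySem.Set.contains])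

-- ===== VERDICT (by name: the statement is the Claim_ definition above) =====
theorem messageCountPerPersonNoFlood_spec : Claim_equal_messageCountPerPersonNoFlood := by
  intro lines _
  show _ = _
  unfold messageCountPerPersonNoFlood messageCountPerPersonNoFlood_alt
  have hA := pvMain lines PySem.Dict.empty "" none ⟨rfl, PySem.Dict.contains_empty _⟩
  have hA' : (lines.foldl pvStepA (PySem.Dict.empty, "")).1.items
      = (PySem.Set.ofList (pvGroupKeys none lines)).map
          (fun k => (k, ((pvGroupKeys none lines).count k : Int))) := by
    rw [hA, PySem.Dict.foldl_insert_getD_add_one_eq_counter, PySem.Dict.items_counter]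
  have hsets : PySem.Set.ofList (pvGroupKeys none lines) = PySem.Set.ofList lines := by
    rw [PySem.Set.ofList_eq_foldl, PySem.Set.ofList_eq_foldl]
    exact pvDedupGroup lines none PySem.Set.empty (by simp)
  rw [show (fun (st : PySem.Dict String Int × String) (i : String) =>
        if st.1.contains i then
          if i == st.2 then st
          else (st.1.insert i (st.1.getD i 0 + 1), i)
        else (st.1.insert i 1, i)) = pvStepA from rfl]
  rw [hA', hsets]
  simp only [PySem.Dict.keys_counter, PySem.Dict.getD_counter]
  apply List.map_congr_left
  intro k _
  have h := pvCountSplit k lines none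
  simp only [pvRepsFrom, pvReps] at h
  have hcast : (((pvGroupKeys none lines).count k : Int))
      = (lines.count k : Int)
        - (((lines.zip (lines.drop 1)).filterMap
              (fun p => if p.1 == p.2 then some p.1 else none)).count k : Int) := by
    omega
  rw [hcast]
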